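-- pv_equiv track=rewrite | github.com/ZaytsevNS/python_codewars | 7KYU/pass_the_door_man.py | pass_the_door_man
-- ===== SOURCE A (Python) =====
-- import string
--
-- def pass_the_door_man(word: str) -> int:
--     """ This function finds the doubled letter's position of the given word in the alphabet
--     and multiply this number per 3. """
--     try:
--         alphabet = {k:v for k, v in enumerate(string.ascii_lowercase, start=1)}
--         for i in range(len(word) - 1):
--             if word[i] == word[i + 1]:
--                 for k, v in alphabet.items():
--                     if word[i] in v:
--                         return k * 3
--     except:
--         return -1
-- ===== SOURCE B (Python) =====
-- import re
--
-- def pass_the_door_man(word: str) -> int: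
--     """Regex re-implementation: first adjacent pair of identical lowercase
--     letters, alphabet position via ord() arithmetic; -1 only on exceptions."""
--     try:
--         m = re.search(r'([a-z])\1', word)
--         if m:
--             return (ord(m.group(1)) - 96) * 3
--     except:
--         return -1
-- ===== Notes on version B (the rewrite author's own statement) =====
-- stated objective: idiomatic
-- what changed: Replaces the explicit index loop over adjacent pairs plus a 26-entry enumerate-built dict scanned item by item with a single re.search for ([a-z])\1 and ord() arithmetic for the alphabet position.
import Mathlib
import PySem

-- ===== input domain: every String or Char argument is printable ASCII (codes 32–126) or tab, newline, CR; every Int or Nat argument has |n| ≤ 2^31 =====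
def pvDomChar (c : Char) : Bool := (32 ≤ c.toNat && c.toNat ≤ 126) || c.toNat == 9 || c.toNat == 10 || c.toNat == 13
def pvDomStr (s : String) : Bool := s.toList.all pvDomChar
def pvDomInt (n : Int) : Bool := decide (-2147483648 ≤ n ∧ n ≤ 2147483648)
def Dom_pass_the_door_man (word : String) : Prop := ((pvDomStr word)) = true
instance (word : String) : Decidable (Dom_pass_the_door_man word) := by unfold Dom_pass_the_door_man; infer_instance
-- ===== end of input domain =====

-- B replaces A's index loop plus 26-entry dict scan by a single adjacent-pair
-- regex search with ord() arithmetic (idiomatic; same asymptotic cost).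

-- ===== PORT A =====
-- alphabet = {k: v for k, v in enumerate(string.ascii_lowercase, start=1)}
def pvAlphabetA : PySem.Dict Int String :=
  (PySem.List.enumerate "abcdefghijklmnopqrstuvwxyz".toList 1).foldl
    (fun d kv => d.insert kv.1 (String.ofList [kv.2])) PySem.Dict.empty

-- inner loop: for k, v in alphabet.items(): if word[i] in v: return k * 3
def pvInnerA (c : Char) : List (Int × String) → Option Int
  | [] => none
  | (k, v) :: rest =>
      if PySem.Str.isIn (String.ofList [c]) v then some (k * 3) else pvInnerA c rest

-- outer loop: for i in range(len(word) - 1); an IndexError would reach the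
-- bare except and return -1 (never hit for these in-range indices)
def pvLoopA (cs : List Char) : List Int → Option Int
  | [] => none
  | i :: rest =>
      match PySem.List.pyGet? cs i, PySem.List.pyGet? cs (i + 1) with
      | some a, some b =>
          if a = b then
            match pvInnerA a pvAlphabetA.items with
            | some r => some r
            | none => pvLoopA cs rest
          else pvLoopA cs rest
      | _, _ => some (-1)

def pass_the_door_man (word : String) : Option Int :=
  pvLoopA word.toList (PySem.List.pyRange 0 (PySem.Str.len word - 1) 1)

-- ===== PORT B =====
-- re.search(r'([a-z])\1', word): leftmost position whose char is a lowercase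
-- letter equal to the next char (port of the regex's left-to-right search)
def pvFindDouble : List Char → Option Char
  | a :: b :: rest =>
      if a = b ∧ 'a' ≤ a ∧ a ≤ 'z' then some a else pvFindDouble (b :: rest)
  | _ => none

def pass_the_door_man_alt (word : String) : Option Int :=
  (pvFindDouble word.toList).map (fun c => ((c.toNat : Int) - 96) * 3)

-- ===== PRECONDITION & SPEC =====
def Spec_pass_the_door_man (word : String) (out : Option Int) : Prop := out = pass_the_door_man_alt word
instance (word : String) (out : Option Int) : Decidable (Spec_pass_the_door_man word out) := by unfold Spec_pass_the_door_man; infer_instance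

-- ===== CLAIM (what is proved, stated in full; the proofs are below) =====
def Claim_equal_pass_the_door_man : Prop := ∀ (word : String), Dom_pass_the_door_man word → Spec_pass_the_door_man word (pass_the_door_man word)

-- ===== LEMMAS AND PROOFS =====

theorem pvCharNe (c d : Char) (h : ¬ c = d) : c.toNat ≠ d.toNat :=
  fun he => h (Char.ext (UInt32.toNat_inj.mp he))

theorem pvCharLe {c d : Char} (h : c ≤ d) : c.toNat ≤ d.toNat := by
  rw [Char.le_def] at h; exact UInt32.le_iff_toNat_le.mp h

set_option maxHeartbeats 1000000 in
theorem pvAlphabetA_items :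
    pvAlphabetA.items = [(1, String.ofList ['a']), (2, String.ofList ['b']), (3, String.ofList ['c']), (4, String.ofList ['d']), (5, String.ofList ['e']), (6, String.ofList ['f']), (7, String.ofList ['g']), (8, String.ofList ['h']), (9, String.ofList ['i']), (10, String.ofList ['j']), (11, String.ofList ['k']), (12, String.ofList ['l']), (13, String.ofList ['m']), (14, String.ofList ['n']), (15, String.ofList ['o']), (16, String.ofList ['p']), (17, String.ofList ['q']), (18, String.ofList ['r']), (19, String.ofList ['s']), (20, String.ofList ['t']), (21, String.ofList ['u']), (22, String.ofList ['v']), (23, String.ofList ['w']), (24, String.ofList ['x']), (25, String.ofList ['y']), (26, String.ofList ['z'])] := by decide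

theorem pvIsIn_single (c d : Char) :
    PySem.Str.isIn (String.ofList [c]) (String.ofList [d]) = true ↔ c = d := by
  rw [PySem.Str.isIn_iff_infix]; simp

theorem pvIsIn_single' (c d : Char) : PySem.Chars.isIn [c] [d] = true ↔ c = d := by
  have h := pvIsIn_single c d
  simpa [PySem.Str.isIn] using h

set_option maxHeartbeats 4000000 in
theorem pvInnerA_eq (c : Char) :
    pvInnerA c pvAlphabetA.items =
      if 'a' ≤ c ∧ c ≤ 'z' then some (((c.toNat : Int) - 96) * 3) else none := by
  rw [pvAlphabetA_items]
  by_cases hc1 : c = 'a'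
  · subst hc1; decide
  by_cases hc2 : c = 'b'
  · subst hc2; decide
  by_cases hc3 : c = 'c'
  · subst hc3; decide
  by_cases hc4 : c = 'd'
  · subst hc4; decide
  by_cases hc5 : c = 'e'
  · subst hc5; decide
  by_cases hc6 : c = 'f'
  · subst hc6; decide
  by_cases hc7 : c = 'g'
  · subst hc7; decide
  by_cases hc8 : c = 'h'
  · subst hc8; decide
  by_cases hc9 : c = 'i'
  · subst hc9; decide
  by_cases hc10 : c = 'j'
  · subst hc10; decide
  by_cases hc11 : c = 'k'
  · subst hc11; decide
  by_cases hc12 : c = 'l'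
  · subst hc12; decide
  by_cases hc13 : c = 'm'
  · subst hc13; decide
  by_cases hc14 : c = 'n'
  · subst hc14; decide
  by_cases hc15 : c = 'o'
  · subst hc15; decide
  by_cases hc16 : c = 'p'
  · subst hc16; decide
  by_cases hc17 : c = 'q'
  · subst hc17; decide
  by_cases hc18 : c = 'r'
  · subst hc18; decide
  by_cases hc19 : c = 's'
  · subst hc19; decide
  by_cases hc20 : c = 't'
  · subst hc20; decide
  by_cases hc21 : c = 'u'
  · subst hc21; decide
  by_cases hc22 : c = 'v'
  · subst hc22; decide
  by_cases hc23 : c = 'w'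
  · subst hc23; decide
  by_cases hc24 : c = 'x'
  · subst hc24; decide
  by_cases hc25 : c = 'y'
  · subst hc25; decide
  by_cases hc26 : c = 'z'
  · subst hc26; decide
  have hlow : ¬('a' ≤ c ∧ c ≤ 'z') := by
    rintro ⟨ha, hb⟩
    have la := pvCharLe ha
    have lb := pvCharLe hb
    have e1 := pvCharNe c 'a' hc1
    have e2 := pvCharNe c 'b' hc2
    have e3 := pvCharNe c 'c' hc3
    have e4 := pvCharNe c 'd' hc4
    have e5 := pvCharNe c 'e' hc5
    have e6 := pvCharNe c 'f' hc6
    have e7 := pvCharNe c 'g' hc7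
    have e8 := pvCharNe c 'h' hc8
    have e9 := pvCharNe c 'i' hc9
    have e10 := pvCharNe c 'j' hc10
    have e11 := pvCharNe c 'k' hc11
    have e12 := pvCharNe c 'l' hc12
    have e13 := pvCharNe c 'm' hc13
    have e14 := pvCharNe c 'n' hc14
    have e15 := pvCharNe c 'o' hc15
    have e16 := pvCharNe c 'p' hc16
    have e17 := pvCharNe c 'q' hc17
    have e18 := pvCharNe c 'r' hc18
    have e19 := pvCharNe c 's' hc19
    have e20 := pvCharNe c 't' hc20
    have e21 := pvCharNe c 'u' hc21
    have e22 := pvCharNe c 'v' hc22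
    have e23 := pvCharNe c 'w' hc23
    have e24 := pvCharNe c 'x' hc24
    have e25 := pvCharNe c 'y' hc25
    have e26 := pvCharNe c 'z' hc26
    simp only [show Char.toNat 'a' = 97 from rfl, show Char.toNat 'b' = 98 from rfl, show Char.toNat 'c' = 99 from rfl, show Char.toNat 'd' = 100 from rfl, show Char.toNat 'e' = 101 from rfl, show Char.toNat 'f' = 102 from rfl, show Char.toNat 'g' = 103 from rfl, show Char.toNat 'h' = 104 from rfl, show Char.toNat 'i' = 105 from rfl, show Char.toNat 'j' = 106 from rfl, show Char.toNat 'k' = 107 from rfl, show Char.toNat 'l' = 108 from rfl, show Char.toNat 'm' = 109 from rfl, show Char.toNat 'n' = 110 from rfl, show Char.toNat 'o' = 111 from rfl, show Char.toNat 'p' = 112 from rfl, show Char.toNat 'q' = 113 from rfl, show Char.toNat 'r' = 114 from rfl, show Char.toNat 's' = 115 from rfl, show Char.toNat 't' = 116 from rfl, show Char.toNat 'u' = 117 from rfl, show Char.toNat 'v' = 118 from rfl, show Char.toNat 'w' = 119 from rfl, show Char.toNat 'x' = 120 from rfl, show Char.toNat 'y' = 121 from rfl, show Char.toNat 'z' =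 122 from rfl] at la lb e1 e2 e3 e4 e5 e6 e7 e8 e9 e10 e11 e12 e13 e14 e15 e16 e17 e18 e19 e20 e21 e22 e23 e24 e25 e26
    omega
  simp [pvInnerA, pvIsIn_single', hlow, hc1, hc2, hc3, hc4, hc5, hc6, hc7, hc8, hc9, hc10, hc11, hc12, hc13, hc14, hc15, hc16, hc17, hc18, hc19, hc20, hc21, hc22, hc23, hc24, hc25, hc26]

theorem pvFindDouble_short (l : List Char) (h : l.length ≤ 1) : pvFindDouble l = none := by
  match l with
  | [] => rfl
  | [a] => rfl
  | a :: b :: t => simp at h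

theorem pvLoopA_eq_aux (cs : List Char) :
    ∀ (n k : Nat), cs.length - k ≤ n →
      pvLoopA cs (PySem.List.pyRange (k : Int) ((cs.length : Int) - 1) 1) =
        (pvFindDouble (cs.drop k)).map (fun c => ((c.toNat : Int) - 96) * 3) := by
  intro n
  induction n with
  | zero =>
      intro k hk
      rw [PySem.List.pyRange_one_eq_nil (by omega)]
      rw [pvFindDouble_short _ (by simp; omega)]
      rfl
  | succ n ih =>
      intro k hk
      by_cases hlt : (k : Int) < (cs.length : Int) - 1
      · have hk1 : k + 1 < cs.length := by omega
        have hk0 : k < cs.length := by omega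
        rw [PySem.List.pyRange_one_cons hlt]
        have g0 : PySem.List.pyGet? cs (k : Int) = some cs[k] := by
          rw [PySem.List.pyGet?_natCast]; exact List.getElem?_eq_getElem hk0
        have g1 : PySem.List.pyGet? cs ((k : Int) + 1) = some cs[k + 1] := by
          have hc : (k : Int) + 1 = ((k + 1 : Nat) : Int) := by push_cast; ring
          rw [hc, PySem.List.pyGet?_natCast]; exact List.getElem?_eq_getElem hk1
        have hdrop : cs.drop k = cs[k] :: cs[k + 1] :: cs.drop (k + 2) := by
          rw [List.drop_eq_getElem_cons hk0, List.drop_eq_getElem_cons hk1]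
        have hdrop1 : cs.drop (k + 1) = cs[k + 1] :: cs.drop (k + 2) :=
          List.drop_eq_getElem_cons hk1
        have hrec := ih (k + 1) (by omega)
        rw [hdrop]
        show pvLoopA cs ((k : Int) :: PySem.List.pyRange ((k : Int) + 1) ((cs.length : Int) - 1) 1) = _
        rw [pvLoopA]
        simp only [g0, g1]
        have hcast : (k : Int) + 1 = ((k + 1 : Nat) : Int) := by push_cast; ring
        by_cases heq : cs[k] = cs[k + 1]
        · rw [if_pos heq, pvInnerA_eq]
          by_cases hlow : 'a' ≤ cs[k] ∧ cs[k] ≤ 'z'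
          · rw [if_pos hlow]
            rw [pvFindDouble, if_pos ⟨heq, hlow⟩]
            rfl
          · rw [if_neg hlow]
            rw [pvFindDouble, if_neg (by tauto)]
            rw [hcast, hrec, hdrop1]
        · rw [if_neg heq]
          rw [pvFindDouble, if_neg (by tauto)]
          rw [hcast, hrec, hdrop1]
      · rw [PySem.List.pyRange_one_eq_nil (by omega)]
        rw [pvFindDouble_short _ (by simp; omega)]
        rfl

-- ===== VERDICT (by name: the statement is the Claim_ definition above) =====
theorem pass_the_door_man_spec : Claim_equal_pass_the_door_man := by
  intro word _
  unfold Spec_pass_the_door_man pass_the_door_man pass_the_door_man_alt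
  have h := pvLoopA_eq_aux word.toList word.toList.length 0 (by omega)
  simp only [Nat.cast_zero, List.drop_zero] at h
  simpa [PySem.Str.len_eq] using h
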